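-- pv_equiv track=rewrite | github.com/xiaoyang-sde/knowledge-base | docs/computer-science/online-judge/stripe/server-remove-penalty.py | get_best_removal_times
-- ===== SOURCE A (Python) =====
-- def find_best_removal_time(log):
--   # log = list(map(int, log.split()))
--   # min_penalty = log.count(0)
--   # for remove_time in range(1, len(log) + 1):
--   #   penalty = compute_penalty(log, remove_time)
--
--   #   if penalty < min_penalty:
--   #     min_penalty = penalty
--   #     result = remove_time
--   # return result
--   log = list(map(int, log.split()))
--   penalty = log.count(0)
--   min_penalty = penalty
--   result = 0
--
--   for remove_time in range(1, len(log) + 1):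
--     if log[remove_time - 1] == 0:
--       penalty -= 1
--     else:
--       penalty += 1
--
--     if penalty < min_penalty:
--       min_penalty = penalty
--       result = remove_time
--
--   return result
--
-- def get_best_removal_times(logs):
--   logs = ' '.join(logs.split('\n'))
--   logs = logs.split(' ')
--   start = -1
--   result = []
--   for end, log in enumerate(logs):
--     if log == 'BEGIN':
--       start = end
--     if log == 'END' and start >= 0:
--       result.append(find_best_removal_time(' '.join(logs[start + 1:end])))
--       start = -1
--   return result
-- ===== SOURCE B (Python) =====
-- def find_best_removal_time(log):
--   values = [int(x) for x in log.split()]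
--   best, best_t, rel = 0, len(values), 0
--   for t, v in reversed(list(enumerate(values))):
--     rel += 1 if v == 0 else -1
--     if rel <= best:
--       best, best_t = rel, t
--   return best_t
--
-- def get_best_removal_times(logs):
--   tokens = ' '.join(logs.split('\n')).split(' ')
--   result = []
--   seg = None
--   for tok in tokens:
--     if tok == 'BEGIN':
--       seg = []
--     elif tok == 'END' and seg is not None:
--       result.append(find_best_removal_time(' '.join(seg)))
--       seg = None
--     elif seg is not None:
--       seg.append(tok)
--   return result
-- ===== Notes on version B (the rewrite author's own statement) =====
-- stated objective: alternative
-- what changed: Per-segment search no longer computes count(0) or any absolute penalty: B scans the parsed segment right-to-left maintaining only the penalty RELATIVE to removing at the very end (+1 per zero, -1 per nonzero) and takes the argmin with a <=-update so the earliest index wins, whereas A seeds with count(0) and runs a left-to-right absolute-penalty pass with strict-< running-min; the outer BEGIN/END matcher accumulates the current segment's tokens instead of remembering a start index and slicing.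
import Mathlib
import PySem

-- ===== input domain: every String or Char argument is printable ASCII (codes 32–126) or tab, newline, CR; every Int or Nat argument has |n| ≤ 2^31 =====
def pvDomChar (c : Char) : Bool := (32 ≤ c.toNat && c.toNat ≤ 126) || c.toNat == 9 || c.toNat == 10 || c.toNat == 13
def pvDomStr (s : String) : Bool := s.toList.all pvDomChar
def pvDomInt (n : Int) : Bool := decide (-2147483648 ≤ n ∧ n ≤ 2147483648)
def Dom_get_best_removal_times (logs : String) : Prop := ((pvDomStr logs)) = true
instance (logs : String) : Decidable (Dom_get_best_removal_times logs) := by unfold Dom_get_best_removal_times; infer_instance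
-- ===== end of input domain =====

-- B replaces A's count(0)-seeded left-to-right absolute-penalty/strict-min pass by a right-to-left
-- scan of the RELATIVE penalty (no zero count, ≤-update so the earliest index wins), and the outer
-- matcher accumulates segment tokens instead of slicing by a remembered index (alternative
-- decomposition, same asymptotic cost).

-- ===== PORT A =====
def find_best_removal_time (log : String) : Int :=
  -- int(t) is exact under Pre_ (every word of a matched segment parses); .getD 0 is never hit there
  let log := (PySem.Str.split₀ log).map (fun t => (PySem.Int.ofStr? t).getD 0)
  let penalty : Int := (PySem.List.count log 0 : Int)
  ((PySem.List.pyRange 1 ((log.length : Int) + 1) 1).foldl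
    (fun (s : Int × Int × Int) rt =>
      let p := if PySem.List.pyGetD log (rt - 1) 0 == 0 then s.1 - 1 else s.1 + 1
      if p < s.2.1 then (p, p, rt) else (p, s.2.1, s.2.2))
    (penalty, penalty, 0)).2.2

def get_best_removal_times (logs : String) : List Int :=
  let toks := (PySem.Str.split? (PySem.Str.join " " ((PySem.Str.split? logs "\n").getD [])) " ").getD []
  ((PySem.List.enumerate toks 0).foldl
    (fun (s : Int × List Int) p =>
      let start := if p.2 == "BEGIN" then p.1 else s.1
      if p.2 == "END" && decide (0 ≤ start) then
        (-1, s.2 ++ [find_best_removal_time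
          (PySem.Str.join " " (PySem.List.slice toks (some (start + 1)) (some p.1)))])
      else (start, s.2))
    (-1, [])).2

-- ===== PORT B =====
def find_best_removal_time_alt (log : String) : Int :=
  let values := (PySem.Str.split₀ log).map (fun t => (PySem.Int.ofStr? t).getD 0)
  -- state (best, best_t, rel); 'for t, v in reversed(list(enumerate(values)))'
  (((PySem.List.enumerate values 0).reverse).foldl
    (fun (s : Int × Int × Int) p =>
      let rel := s.2.2 + (if p.2 == 0 then (1 : Int) else -1)
      if rel ≤ s.1 then (rel, p.1, rel) else (s.1, s.2.1, rel))
    (0, (values.length : Int), 0)).2.1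

def get_best_removal_times_alt (logs : String) : List Int :=
  let toks := (PySem.Str.split? (PySem.Str.join " " ((PySem.Str.split? logs "\n").getD [])) " ").getD []
  (toks.foldl
    (fun (s : Option (List String) × List Int) tok =>
      if tok == "BEGIN" then (some [], s.2)
      else if tok == "END" && s.1.isSome then
        (none, s.2 ++ [find_best_removal_time_alt (PySem.Str.join " " (s.1.getD []))])
      else
        match s.1 with
        | some seg => (some (seg ++ [tok]), s.2)
        | none => s)
    (none, [])).2

-- ===== PRECONDITION & SPEC =====
-- the tokens of every matched BEGIN/END segment, exactly those A feeds to int()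
def pvInsideTokens (toks : List String) : List String :=
  (toks.foldl
    (fun (s : Option (List String) × List String) tok =>
      if tok = "BEGIN" then (some [], s.2)
      else if tok = "END" then
        match s.1 with
        | some seg => (none, s.2 ++ seg)
        | none => s
      else
        match s.1 with
        | some seg => (some (seg ++ [tok]), s.2)
        | none => s)
    (none, [])).2

-- Pre_ holds exactly when Python A returns: every whitespace-separated word of every matched
-- BEGIN/END segment parses as an int; outside it A raises ValueError from int().
def Pre_get_best_removal_times (logs : String) : Prop :=
  ∀ tok ∈ pvInsideTokens
      ((PySem.Str.split? (PySem.Str.join " " ((PySem.Str.split? logs "\n").getD [])) " ").getD []),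
    ∀ w ∈ PySem.Str.split₀ tok, (PySem.Int.ofStr? w).isSome = true

instance (logs : String) : Decidable (Pre_get_best_removal_times logs) := by
  unfold Pre_get_best_removal_times; infer_instance

def pvWitness_get_best_removal_times : String := "BEGIN 1 0 1 END x BEGIN 0 END"

def Spec_get_best_removal_times (logs : String) (out : List Int) : Prop :=
  out = get_best_removal_times_alt logs
instance (logs : String) (out : List Int) : Decidable (Spec_get_best_removal_times logs out) := by
  unfold Spec_get_best_removal_times; infer_instance

-- ===== CLAIM (what is proved, stated in full; the proofs are below) =====
def Claim_equal_get_best_removal_times : Prop :=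
  ∀ (logs : String), Dom_get_best_removal_times logs → Pre_get_best_removal_times logs →
    Spec_get_best_removal_times logs (get_best_removal_times logs)

-- ===== LEMMAS AND PROOFS =====

def pvStep (p v : Int) : Int := if v == 0 then p - 1 else p + 1
def pvW (v : Int) : Int := if v == 0 then 1 else -1
def pvMinStep (s : Int × Int) (q : Int × Int) : Int × Int := if q.2 < s.1 then (q.2, q.1) else s

-- relative-penalty table of B: pvRelT vs = [rel(0), …, rel(n)], rel(t) = penalty(t) - penalty(n)
def pvRelT : List Int → List Int
  | [] => [0]
  | v :: rest => (pvW v + (pvRelT rest).headI) :: pvRelT rest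

def pvRmin (vs : List Int) : Int :=
  match pvRelT vs with
  | [] => 0
  | r :: rs => rs.foldl min r

lemma pvRelT_cons (vs : List Int) : ∃ r R', pvRelT vs = r :: R' := by
  cases vs <;> exact ⟨_, _, rfl⟩

lemma pvScanl_head {α β : Type} (f : β → α → β) (b : β) (l : List α) :
    List.scanl f b l = b :: (List.scanl f b l).tail := by
  cases l <;> simp [List.scanl]

lemma pvAloop (rem full : List Int) (t : Nat) (hd : full.drop t = rem) (ht : t ≤ full.length)
    (pen minp res : Int) :
    ((PySem.List.pyRange ((t : Int) + 1) ((full.length : Int) + 1) 1).foldl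
      (fun (s : Int × Int × Int) rt =>
        let p := if PySem.List.pyGetD full (rt - 1) 0 == 0 then s.1 - 1 else s.1 + 1
        if p < s.2.1 then (p, p, rt) else (p, s.2.1, s.2.2))
      (pen, minp, res)).2
    = (PySem.List.enumerate (List.scanl pvStep pen rem).tail ((t : Int) + 1)).foldl
        pvMinStep (minp, res) := by
  induction rem generalizing t pen minp res with
  | nil =>
    have hlen : full.length ≤ t := by
      have := List.drop_eq_nil_iff.mp hd; omega
    rw [PySem.List.pyRange_one_eq_nil (by omega)]
    simp [List.scanl]
  | cons v rem ih =>
    have hlt : t < full.length := by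
      by_contra h
      have : full.drop t = [] := List.drop_eq_nil_iff.mpr (by omega)
      rw [this] at hd; exact (List.cons_ne_nil v rem) hd.symm
    have hget : full[t]? = some v := by
      have h0 : (full.drop t)[0]? = some v := by rw [hd]; rfl
      rw [List.getElem?_drop] at h0; simpa using h0
    have hgetD : full.getD t 0 = v := by simp [List.getD, hget]
    have hdrop : full.drop (t + 1) = rem := by
      have : full.drop (t + 1) = (full.drop t).tail := by
        rw [← List.drop_drop]; simp
      rw [this, hd]; rfl
    rw [PySem.List.pyRange_one_cons (by omega)]
    simp only [List.foldl_cons]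
    have harg : ((t : Int) + 1 - 1) = ((t : Nat) : Int) := by omega
    rw [harg, PySem.List.pyGetD_natCast, hgetD]
    have hstep : (if (v == 0) = true then pen - 1 else pen + 1) = pvStep pen v := rfl
    rw [List.scanl_cons]
    rw [pvScanl_head pvStep (pvStep pen v) rem]
    simp only [List.tail_cons, PySem.List.enumerate_cons, List.foldl_cons]
    rw [hstep]
    by_cases hlt2 : pvStep pen v < minp
    · have hps : pvMinStep (minp, res) ((t : Int) + 1, pvStep pen v)
          = (pvStep pen v, (t : Int) + 1) := by simp [pvMinStep, hlt2]
      rw [hps]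
      have h := ih (t + 1) hdrop (by omega) (pvStep pen v) (pvStep pen v) ((t : Int) + 1)
      push_cast at h ⊢
      simpa [hlt2] using h
    · have hps : pvMinStep (minp, res) ((t : Int) + 1, pvStep pen v) = (minp, res) := by
        simp [pvMinStep, hlt2]
      rw [hps]
      have h := ih (t + 1) hdrop (by omega) (pvStep pen v) minp res
      push_cast at h ⊢
      simpa [hlt2] using h

lemma pvArgmin (rest : List Int) (k m r : Int) :
    (PySem.List.enumerate rest k).foldl pvMinStep (m, r)
    = (rest.foldl min m,
       if rest.foldl min m < m then
         k + ((PySem.List.index? rest (rest.foldl min m)).getD 0 : Int)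
       else r) := by
  induction rest generalizing k m r with
  | nil => simp
  | cons p rest ih =>
    rw [PySem.List.enumerate_cons, List.foldl_cons]
    by_cases hpm : p < m
    · rw [show pvMinStep (m, r) (k, p) = (p, k) from by simp [pvMinStep, hpm], ih,
        List.foldl_cons, min_eq_right (le_of_lt hpm)]
      have hMle : rest.foldl min p ≤ p := (PySem.List.foldl_min_le rest p).1
      by_cases hMp : rest.foldl min p < p
      · have hne : rest.foldl min p ≠ p := by omega
        have hmem : rest.foldl min p ∈ rest := by
          rcases PySem.List.foldl_min_mem rest p with h | h
          · exact absurd h hne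
          · exact h
        obtain ⟨i, hi⟩ := Option.isSome_iff_exists.mp
          ((PySem.List.index?_isSome_iff _ _).mpr hmem)
        have hidx : PySem.List.index? (p :: rest) (rest.foldl min p) = some (i + 1) := by
          rw [PySem.List.index?_cons_of_ne _ (fun h => hne h.symm), hi]; rfl
        rw [if_pos hMp, hi, hidx, if_pos (show rest.foldl min p < m by omega)]
        simp [Prod.ext_iff]
        omega
      · have hMeq : rest.foldl min p = p := by omega
        have hidx : PySem.List.index? (p :: rest) (rest.foldl min p) = some 0 := by
          rw [hMeq]; exact PySem.List.index?_cons_self p rest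
        rw [if_neg hMp, hidx, if_pos (show rest.foldl min p < m by omega)]
        simp
    · rw [show pvMinStep (m, r) (k, p) = (m, r) from by simp [pvMinStep, hpm], ih,
        List.foldl_cons, min_eq_left (by omega : m ≤ p)]
      have hMle : rest.foldl min m ≤ m := (PySem.List.foldl_min_le rest m).1
      by_cases hMm : rest.foldl min m < m
      · have hne : rest.foldl min m ≠ p := by omega
        have hmem : rest.foldl min m ∈ rest := by
          rcases PySem.List.foldl_min_mem rest m with h | h
          · omega
          · exact h
        obtain ⟨i, hi⟩ := Option.isSome_iff_exists.mp
          ((PySem.List.index?_isSome_iff _ _).mpr hmem)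
        have hidx : PySem.List.index? (p :: rest) (rest.foldl min m) = some (i + 1) := by
          rw [PySem.List.index?_cons_of_ne _ (fun h => hne h.symm), hi]; rfl
        rw [if_pos hMm, hi, hidx, if_pos hMm]
        simp [Prod.ext_iff]
        omega
      · rw [if_neg hMm, if_neg hMm]

-- scanl of A's absolute penalties is B's relative table shifted by a constant
lemma pvScanl_eq_map (vs : List Int) (c : Int) :
    List.scanl pvStep c vs = (pvRelT vs).map (fun r => r + (c - (pvRelT vs).headI)) := by
  induction vs generalizing c with
  | nil => simp [pvRelT, List.scanl]
  | cons v rest ih =>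
    obtain ⟨r1, R'', hR⟩ := pvRelT_cons rest
    have hh : (pvRelT rest).headI = r1 := by rw [hR]; rfl
    have hstep : c - pvW v = pvStep c v := by unfold pvStep pvW; split <;> omega
    have htail := ih (pvStep c v)
    rw [List.scanl_cons, htail]
    simp only [pvRelT, hh, List.headI_cons, List.map_cons]
    refine List.cons_eq_cons.mpr ⟨by ring, ?_⟩
    apply List.map_congr_left
    intro r _
    rw [← hstep]; ring

lemma pvFoldlMin_min (l : List Int) (a b : Int) :
    List.foldl min (min a b) l = min a (List.foldl min b l) := by
  induction l generalizing b with
  | nil => rfl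
  | cons x xs ih =>
    simp only [List.foldl_cons]
    rw [min_assoc, ih]

lemma pvFoldlMin_map_add (l : List Int) (a K : Int) :
    List.foldl min (a + K) (l.map (fun r => r + K)) = (List.foldl min a l) + K := by
  induction l generalizing a with
  | nil => rfl
  | cons x xs ih =>
    simp only [List.map_cons, List.foldl_cons]
    rw [min_add_add_right]
    exact ih (min a x)

lemma pvIndex?_map_add (l : List Int) (x K : Int) :
    PySem.List.index? (l.map (fun r => r + K)) (x + K) = PySem.List.index? l x := by
  induction l with
  | nil => rfl
  | cons y ys ih =>
    by_cases hyx : y = x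
    · subst hyx
      rw [List.map_cons, PySem.List.index?_cons_self, PySem.List.index?_cons_self]
    · rw [List.map_cons,
        PySem.List.index?_cons_of_ne _ (by intro h; exact hyx (by omega)),
        PySem.List.index?_cons_of_ne _ hyx, ih]

-- B's reversed fold computes (min of the relative table, earliest argmin index, its head)
lemma pvBfold (vs : List Int) (t : Nat) :
    List.foldr
      (fun (p : Int × Int) (s : Int × Int × Int) =>
        let rel := s.2.2 + (if p.2 == 0 then (1 : Int) else -1)
        if rel ≤ s.1 then (rel, p.1, rel) else (s.1, s.2.1, rel))
      (0, (((t + vs.length : Nat)) : Int), 0)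
      (PySem.List.enumerate vs (t : Int))
    = (pvRmin vs,
       (t : Int) + ((PySem.List.index? (pvRelT vs) (pvRmin vs)).getD 0 : Int),
       (pvRelT vs).headI) := by
  induction vs generalizing t with
  | nil => simp [pvRelT, pvRmin]
  | cons v rest ih =>
    obtain ⟨r1, R'', hR⟩ := pvRelT_cons rest
    have hm : pvRmin rest = R''.foldl min r1 := by unfold pvRmin; rw [hR]
    rw [PySem.List.enumerate_cons, List.foldr_cons]
    have hcast : ((t : Int) + 1) = (((t + 1 : Nat)) : Int) := by push_cast; ring
    have hlen : (t + (v :: rest).length) = ((t + 1) + rest.length) := by simp; omega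
    rw [hcast, hlen, ih (t + 1)]
    simp only
    set h := (pvRelT rest).headI with hh
    set m := pvRmin rest with hmdef
    set r0 : Int := pvW v + h with hr0
    have hrel : h + (if (v == 0) = true then (1 : Int) else -1) = r0 := by
      rw [hr0]; unfold pvW; split <;> omega
    have hRv : pvRelT (v :: rest) = r0 :: pvRelT rest := rfl
    have hRmin : pvRmin (v :: rest) = min r0 m := by
      unfold pvRmin
      rw [hRv, hR]
      simp only [List.foldl_cons]
      rw [pvFoldlMin_min, ← hm]
    rw [hrel]
    by_cases hle : r0 ≤ m
    · rw [if_pos hle]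
      have : pvRmin (v :: rest) = r0 := by rw [hRmin]; omega
      rw [this, hRv, PySem.List.index?_cons_self]
      simp [hRv]
    · rw [if_neg hle]
      have hmin : pvRmin (v :: rest) = m := by rw [hRmin]; omega
      have hne : r0 ≠ m := by omega
      have hmem : m ∈ pvRelT rest := by
        rw [hm]
        rcases PySem.List.foldl_min_mem R'' r1 with hcase | hcase
        · rw [hcase, hR]; exact List.mem_cons_self
        · rw [hR]; exact List.mem_cons_of_mem _ hcase
      obtain ⟨i, hi⟩ := Option.isSome_iff_exists.mp
        ((PySem.List.index?_isSome_iff _ _).mpr hmem)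
      have hidx : PySem.List.index? (pvRelT (v :: rest)) m = some (i + 1) := by
        rw [hRv, PySem.List.index?_cons_of_ne _ hne, hi]; rfl
      rw [hmin, hidx]
      simp only [hRv, List.headI_cons, Prod.mk.injEq, true_and, and_true]
      rw [hi]
      simp only [Option.getD_some]
      push_cast
      ring

lemma pvInner (log : String) : find_best_removal_time log = find_best_removal_time_alt log := by
  simp only [find_best_removal_time, find_best_removal_time_alt]
  set vs := (PySem.Str.split₀ log).map (fun t => (PySem.Int.ofStr? t).getD 0) with hvs
  set c : Int := (PySem.List.count vs 0 : Int) with hc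
  -- A side
  have hA := pvAloop vs vs 0 (by simp) (by omega) c c 0
  simp only [Nat.cast_zero, zero_add] at hA
  rw [hA, pvArgmin]
  -- B side
  rw [List.foldl_reverse]
  have hB := pvBfold vs 0
  simp only [Nat.cast_zero, zero_add, Nat.zero_add] at hB
  rw [hB]
  simp only
  -- relate the two tables
  obtain ⟨r0, R', hR⟩ := pvRelT_cons vs
  have hhead : (pvRelT vs).headI = r0 := by rw [hR]; rfl
  set K : Int := c - r0 with hK
  have hmap : List.scanl pvStep c vs = (r0 + K) :: R'.map (fun r => r + K) := by
    rw [pvScanl_eq_map vs c, hR]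
    simp only [List.headI_cons, List.map_cons, ← hK]
  have hcK : r0 + K = c := by omega
  have hT : (List.scanl pvStep c vs).tail = R'.map (fun r => r + K) := by
    rw [hmap]; rfl
  rw [hT]
  have hRmin : pvRmin vs = R'.foldl min r0 := by unfold pvRmin; rw [hR]
  have hMin : (R'.map (fun r => r + K)).foldl min c = pvRmin vs + K := by
    rw [← hcK, pvFoldlMin_map_add, hRmin]
  rw [hMin]
  have hle : pvRmin vs ≤ r0 := by rw [hRmin]; exact (PySem.List.foldl_min_le R' r0).1
  by_cases hlt : pvRmin vs + K < c
  · have hlt' : pvRmin vs < r0 := by omega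
    have hne : pvRmin vs ≠ r0 := by omega
    have hmem : pvRmin vs ∈ R' := by
      rw [hRmin]
      rcases PySem.List.foldl_min_mem R' r0 with hcase | hcase
      · rw [hRmin] at hne; exact absurd hcase hne
      · exact hcase
    obtain ⟨i, hi⟩ := Option.isSome_iff_exists.mp
      ((PySem.List.index?_isSome_iff _ _).mpr hmem)
    have hidxA : PySem.List.index? (R'.map (fun r => r + K)) (pvRmin vs + K) = some i := by
      rw [pvIndex?_map_add, hi]
    have hidxB : PySem.List.index? (pvRelT vs) (pvRmin vs) = some (i + 1) := by
      rw [hR, PySem.List.index?_cons_of_ne _ (fun hq => hne hq.symm), hi]; rfl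
    rw [if_pos hlt, hidxA, hidxB]
    simp only [Option.getD_some]
    push_cast; ring
  · rw [if_neg hlt]
    have heq : pvRmin vs = r0 := by omega
    have hidxB : PySem.List.index? (pvRelT vs) (pvRmin vs) = some 0 := by
      rw [hR, heq]; exact PySem.List.index?_cons_self r0 R'
    rw [hidxB]; rfl

lemma pvOuter (rest toks : List String) (t : Nat) (hd : toks.drop t = rest)
    (res : List Int) (os : Option Nat) (hos : ∀ s, os = some s → s < t) :
    ((PySem.List.enumerate rest (t : Int)).foldl
      (fun (s : Int × List Int) p =>
        let start := if p.2 == "BEGIN" then p.1 else s.1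
        if p.2 == "END" && decide (0 ≤ start) then
          (-1, s.2 ++ [find_best_removal_time
            (PySem.Str.join " " (PySem.List.slice toks (some (start + 1)) (some p.1)))])
        else (start, s.2))
      ((match os with | some s => (s : Int) | none => -1), res)).2
    = (rest.foldl
        (fun (s : Option (List String) × List Int) tok =>
          if tok == "BEGIN" then (some [], s.2)
          else if tok == "END" && s.1.isSome then
            (none, s.2 ++ [find_best_removal_time_alt (PySem.Str.join " " (s.1.getD []))])
          else
            match s.1 with
            | some seg => (some (seg ++ [tok]), s.2)
            | none => s)
        (os.map (fun s => (toks.drop (s + 1)).take (t - (s + 1))), res)).2 := by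
  induction rest generalizing t res os with
  | nil => cases os <;> simp
  | cons tok rest ih =>
    have hlt : t < toks.length := by
      by_contra h
      have : toks.drop t = [] := List.drop_eq_nil_iff.mpr (by omega)
      rw [this] at hd; exact (List.cons_ne_nil tok rest) hd.symm
    have hget : toks[t]? = some tok := by
      have h0 : (toks.drop t)[0]? = some tok := by rw [hd]; rfl
      rw [List.getElem?_drop] at h0; simpa using h0
    have hdrop : toks.drop (t + 1) = rest := by
      have : toks.drop (t + 1) = (toks.drop t).tail := by rw [← List.drop_drop]; simp
      rw [this, hd]; rfl
    rw [PySem.List.enumerate_cons, List.foldl_cons, List.foldl_cons]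
    by_cases hB : tok = "BEGIN"
    · subst hB
      have h1 : ("BEGIN" == "END") = false := by decide
      simp only [beq_self_eq_true, if_pos, h1, Bool.false_and, if_false, if_neg,
        Bool.false_eq_true, not_false_eq_true]
      have := ih (t + 1) hdrop res (some t) (by intro s hs; cases hs; omega)
      push_cast at this ⊢
      simpa using this
    · by_cases hE : tok = "END"
      · subst hE
        have h1 : ("END" == "BEGIN") = false := by decide
        cases os with
        | some s =>
          have hst : s < t := hos s rfl
          have hcond : (("END" == "END") && decide ((0:Int) ≤ (s : Int))) = true := by
            simp
          simp only [h1, if_neg, Bool.false_eq_true, not_false_eq_true, hcond, if_pos,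
            Option.map_some, Option.isSome_some, Bool.and_true, beq_self_eq_true,
            Option.getD_some]
          have hslice : PySem.List.slice toks (some ((s : Int) + 1)) (some (t : Int))
              = (toks.drop (s + 1)).take (t - (s + 1)) := by
            have : ((s : Int) + 1) = (((s + 1 : Nat)) : Int) := by push_cast; omega
            rw [this, PySem.List.slice_natCast]
          rw [hslice, pvInner]
          have := ih (t + 1) hdrop
            (res ++ [find_best_removal_time_alt
              (PySem.Str.join " " ((toks.drop (s + 1)).take (t - (s + 1))))])
            none (by intro s hs; cases hs)
          push_cast at this ⊢
          simpa using this
        | none =>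
          have hcond : (("END" == "END") && decide ((0:Int) ≤ (-1 : Int))) = false := by
            decide
          simp only [h1, if_neg, Bool.false_eq_true, not_false_eq_true, hcond, if_false,
            Option.map_none, Option.isSome_none, Bool.and_false]
          have := ih (t + 1) hdrop res none (by intro s hs; cases hs)
          push_cast at this ⊢
          simpa using this
      · have h1 : (tok == "BEGIN") = false := by simpa using hB
        have h2 : (tok == "END") = false := by simpa using hE
        cases os with
        | some s =>
          have hst : s < t := hos s rfl
          have hseg : (toks.drop (s + 1)).take (t - s)
              = (toks.drop (s + 1)).take (t - (s + 1)) ++ [tok] := by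
            have harith : t - s = (t - (s + 1)) + 1 := by omega
            rw [harith, List.take_succ]
            have : (toks.drop (s + 1))[t - (s + 1)]? = some tok := by
              rw [List.getElem?_drop]
              have : s + 1 + (t - (s + 1)) = t := by omega
              rw [this, hget]
            rw [this]; rfl
          simp only [h1, h2, if_neg, if_false, Bool.false_eq_true, not_false_eq_true,
            Bool.false_and, Option.map_some]
          have := ih (t + 1) hdrop res (some s) (by intro s' hs'; cases hs'; omega)
          push_cast at this ⊢
          simp only [Option.map_some] at this
          rw [hseg] at this
          simpa using this
        | none =>
          simp only [h1, h2, if_neg, if_false, Bool.false_eq_true, not_false_eq_true,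
            Bool.false_and, Option.map_none]
          have := ih (t + 1) hdrop res none (by intro s hs; cases hs)
          push_cast at this ⊢
          simpa using this

-- ===== VERDICT (by name: the statement is the Claim_ definition above) =====
theorem get_best_removal_times_spec : Claim_equal_get_best_removal_times := by
  intro logs _ _
  unfold Spec_get_best_removal_times get_best_removal_times get_best_removal_times_alt
  set toks := (PySem.Str.split? (PySem.Str.join " " ((PySem.Str.split? logs "\n").getD [])) " ").getD [] with htoks
  have := pvOuter toks toks 0 (by simp) [] none (by intro s hs; cases hs)
  simp only [Nat.cast_zero, Option.map_none] at this
  simpa using this
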